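-- pv_equiv track=rewrite | github.com/Jun-jie-Huang/LoFI | src/llm_inference/dataset.py | update_start_end_position_after_truncate
-- ===== SOURCE A (Python) =====
-- def update_start_end_position_after_truncate(positions, max_length=510, stride=100):
--     new_positions = []
--     for i, position in enumerate(positions):
--         start_index, end_index = position
--         chunk_start_index = i * stride
--         while end_index - start_index > max_length:
--             new_positions.append((start_index - chunk_start_index, start_index - chunk_start_index + max_length))
--             start_index += stride
--         new_positions.append((start_index - chunk_start_index, end_index - chunk_start_index))
--     return new_positions
-- ===== SOURCE B (Python) =====
-- def _span_chunks(start_index, end_index, max_length, stride, chunk_start_index):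
--     off = start_index - chunk_start_index
--     over = end_index - start_index - max_length
--     n = -(-over // stride) if over > 0 else 0
--     chunks = [(off + k * stride, off + k * stride + max_length) for k in range(n)]
--     chunks.append((off + n * stride, end_index - chunk_start_index))
--     return chunks
--
--
-- def update_start_end_position_after_truncate(positions, max_length=510, stride=100):
--     new_positions = []
--     for i, (start_index, end_index) in enumerate(positions):
--         new_positions += _span_chunks(start_index, end_index, max_length, stride, i * stride)
--     return new_positions
-- ===== Notes on version B (the rewrite author's own statement) =====
-- stated objective: alternative
-- what changed: Replaces A's condition-driven while loop (repeatedly advancing the start by stride until the span fits) with a closed-form ceiling-division count of full chunks per span, emitted by a counted range comprehension plus the final partial chunk.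
import Mathlib
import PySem

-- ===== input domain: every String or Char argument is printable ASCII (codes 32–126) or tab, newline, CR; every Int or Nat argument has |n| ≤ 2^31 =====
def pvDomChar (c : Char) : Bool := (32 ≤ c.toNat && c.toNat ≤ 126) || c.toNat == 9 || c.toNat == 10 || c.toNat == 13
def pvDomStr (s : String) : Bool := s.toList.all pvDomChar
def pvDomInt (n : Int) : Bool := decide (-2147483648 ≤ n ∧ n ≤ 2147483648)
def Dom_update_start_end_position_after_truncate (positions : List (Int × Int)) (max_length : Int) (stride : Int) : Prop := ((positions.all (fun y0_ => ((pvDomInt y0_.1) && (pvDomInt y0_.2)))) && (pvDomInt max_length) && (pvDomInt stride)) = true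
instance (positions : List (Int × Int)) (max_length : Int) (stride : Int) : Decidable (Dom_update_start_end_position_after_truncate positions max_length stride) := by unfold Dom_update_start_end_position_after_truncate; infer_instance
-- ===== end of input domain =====

-- B replaces A's subtract-until-done while loop by a closed-form ceiling-division chunk count
-- per span plus a counted range (objective: alternative/simpler per-span arithmetic).

-- ===== PORT A =====
-- A's inner while loop; the fuel argument only makes it total (it is called with
-- fuel = (end-start-max_length).toNat, enough iterations whenever stride ≥ 1).
def pvChunksA (fuel : Nat) (start_index end_index max_length stride chunk_start_index : Int) : List (Int × Int) :=
  match fuel with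
  | 0 => [(start_index - chunk_start_index, end_index - chunk_start_index)]
  | f+1 =>
    if end_index - start_index > max_length then
      (start_index - chunk_start_index, start_index - chunk_start_index + max_length) ::
        pvChunksA f (start_index + stride) end_index max_length stride chunk_start_index
    else
      [(start_index - chunk_start_index, end_index - chunk_start_index)]

def update_start_end_position_after_truncate (positions : List (Int × Int)) (max_length : Int) (stride : Int) : List (Int × Int) :=
  (PySem.List.enumerate positions 0).foldl
    (fun new_positions ip =>
      new_positions ++ pvChunksA (ip.2.2 - ip.2.1 - max_length).toNat ip.2.1 ip.2.2 max_length stride (ip.1 * stride))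
    []

-- ===== PORT B =====
-- port of Source B's helper _span_chunks
def pvSpanChunksB (start_index end_index max_length stride chunk_start_index : Int) : List (Int × Int) :=
  let off := start_index - chunk_start_index
  let ovr := end_index - start_index - max_length
  let n : Int := if ovr > 0 then -(PySem.Int.floordiv (-ovr) stride) else 0
  ((PySem.List.pyRange 0 n 1).map (fun k => (off + k * stride, off + k * stride + max_length)))
    ++ [(off + n * stride, end_index - chunk_start_index)]

def update_start_end_position_after_truncate_alt (positions : List (Int × Int)) (max_length : Int) (stride : Int) : List (Int × Int) :=
  (PySem.List.enumerate positions 0).foldl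
    (fun new_positions ip => new_positions ++ pvSpanChunksB ip.2.1 ip.2.2 max_length stride (ip.1 * stride))
    []

-- ===== PRECONDITION & SPEC =====
-- Pre_ excludes exactly the inputs on which A never returns: stride ≤ 0 together with some
-- span longer than max_length makes A's while loop run forever (and stride = 0 there is a
-- ZeroDivisionError in B); on every input A returns on, Pre_ holds.
def Pre_update_start_end_position_after_truncate (positions : List (Int × Int)) (max_length : Int) (stride : Int) : Prop :=
  1 ≤ stride ∨ ∀ p ∈ positions, p.2 - p.1 ≤ max_length
instance (positions : List (Int × Int)) (max_length : Int) (stride : Int) : Decidable (Pre_update_start_end_position_after_truncate positions max_length stride) := by unfold Pre_update_start_end_position_after_truncate; infer_instance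

def pvWitness_update_start_end_position_after_truncate : (List (Int × Int)) × Int × Int := ([(0, 9), (2, 3)], 4, 3)

def Spec_update_start_end_position_after_truncate (positions : List (Int × Int)) (max_length : Int) (stride : Int) (out : List (Int × Int)) : Prop := out = update_start_end_position_after_truncate_alt positions max_length stride
instance (positions : List (Int × Int)) (max_length : Int) (stride : Int) (out : List (Int × Int)) : Decidable (Spec_update_start_end_position_after_truncate positions max_length stride out) := by unfold Spec_update_start_end_position_after_truncate; infer_instance

-- ===== CLAIM (what is proved, stated in full; the proofs are below) =====
def Claim_equal_update_start_end_position_after_truncate : Prop := ∀ (positions : List (Int × Int)) (max_length : Int) (stride : Int), Dom_update_start_end_position_after_truncate positions max_length stride → Pre_update_start_end_position_after_truncate positions max_length stride → Spec_update_start_end_position_after_truncate positions max_length stride (update_start_end_position_after_truncate positions max_length stride)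

-- ===== LEMMAS AND PROOFS =====

-- when the span already fits, both sides emit the single final pair
lemma span_small (s e M st cs : Int) (h : e - s - M ≤ 0) :
    pvSpanChunksB s e M st cs = [(s - cs, e - cs)] := by
  simp only [pvSpanChunksB, if_neg (show ¬ e - s - M > 0 by omega)]
  simp

lemma pyRange_one_shift (n : Int) :
    PySem.List.pyRange 1 (n + 1) 1 = (PySem.List.pyRange 0 n 1).map (fun x => x + 1) := by
  rw [PySem.List.pyRange_one, PySem.List.pyRange_one, List.map_map]
  congr 1
  · funext k; simp [Function.comp]; ring
  · congr 1; omega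

-- B's chunk list peels off its first chunk exactly like one iteration of A's loop
lemma spanB_step (s e M st cs : Int) (hst : 1 ≤ st) (hover : e - s - M > 0) :
    pvSpanChunksB s e M st cs
      = (s - cs, s - cs + M) :: pvSpanChunksB (s + st) e M st cs := by
  have hstp : (0 : Int) < st := by omega
  set n' : Int := if e - (s + st) - M > 0 then -(PySem.Int.floordiv (-(e - (s + st) - M)) st) else 0 with hn'
  have hn'b : (n' - 1) * st < e - s - M - st ∧ e - s - M - st ≤ n' * st := by
    by_cases h : e - (s + st) - M > 0
    · rw [hn', if_pos h]
      have h2 := (PySem.Int.neg_floordiv_neg_eq_iff_of_pos (a := e - (s + st) - M)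
        (q := -(PySem.Int.floordiv (-(e - (s + st) - M)) st)) hstp).mp rfl
      omega
    · rw [hn', if_neg h]; constructor <;> nlinarith
  have hn : (if e - s - M > 0 then -(PySem.Int.floordiv (-(e - s - M)) st) else 0) = n' + 1 := by
    rw [if_pos hover, PySem.Int.neg_floordiv_neg_eq_iff_of_pos hstp]
    ring_nf at hn'b ⊢
    omega
  simp only [pvSpanChunksB, hn, ← hn']
  have hn1 : (0 : Int) < n' + 1 := by nlinarith [hn'b.2]
  rw [PySem.List.pyRange_one_cons hn1, List.map_cons,
    show (0 : Int) + 1 = 1 by norm_num, pyRange_one_shift, List.map_map, List.cons_append]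
  congr 1
  · norm_num
  congr 1
  · apply List.map_congr_left
    intro k _
    simp only [Function.comp, Prod.mk.injEq]
    exact ⟨by ring, by ring⟩
  · congr 2
    ring

-- A's fueled loop equals B's closed-form chunk list whenever the fuel covers the overshoot
lemma chunks_eq (M st cs : Int) (hst : 1 ≤ st) :
    ∀ (fuel : Nat) (s e : Int), (e - s - M).toNat ≤ fuel →
    pvChunksA fuel s e M st cs = pvSpanChunksB s e M st cs := by
  intro fuel
  induction fuel with
  | zero =>
    intro s e h
    rw [span_small s e M st cs (by omega)]
    rfl
  | succ f ih =>
    intro s e h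
    by_cases hc : e - s > M
    · rw [pvChunksA, if_pos hc, ih (s + st) e (by omega),
        spanB_step s e M st cs hst (by omega)]
    · rw [pvChunksA, if_neg hc, span_small s e M st cs (by omega)]

lemma chunks_eq_small (s e M st cs : Int) (h : e - s ≤ M) :
    pvChunksA (e - s - M).toNat s e M st cs = pvSpanChunksB s e M st cs := by
  have h0 : (e - s - M).toNat = 0 := by omega
  rw [h0, span_small s e M st cs (by omega)]
  rfl

-- ===== VERDICT (by name: the statement is the Claim_ definition above) =====
theorem update_start_end_position_after_truncate_spec : Claim_equal_update_start_end_position_after_truncate := by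
  intro positions max_length stride _ hpre
  unfold Spec_update_start_end_position_after_truncate
  unfold update_start_end_position_after_truncate update_start_end_position_after_truncate_alt
  apply PySem.List.foldl_congr_mem
  intro acc ip hip
  rcases hpre with hst | hsmall
  · rw [chunks_eq max_length stride (ip.1 * stride) hst _ ip.2.1 ip.2.2 le_rfl]
  · have hmem : ip.2 ∈ positions := by
      have := (PySem.List.mem_enumerate_iff positions 0 ip).mp hip
      rcases this with ⟨k, hk, hp⟩
      subst hp; exact List.getElem_mem hk
    rw [chunks_eq_small ip.2.1 ip.2.2 max_length stride (ip.1 * stride) (hsmall _ hmem)]
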